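-- pv_equiv track=rewrite | github.com/songqihao77-code/RareDisease-traindata | tools/eval_top50_pairwise_reranker.py | feature_groups
-- ===== SOURCE A (Python) =====
-- def feature_groups(features: list[str]) -> dict[str, list[str]]:
--     relation = [feature for feature in features if feature.startswith("relation__")]
--     return {
--         "all_features": features,
--         "no_hgnn_score": [feature for feature in features if feature != "hgnn_score"],
--         "no_overlap_features": [
--             feature
--             for feature in features
--             if feature not in {"exact_overlap", "ic_weighted_overlap", "semantic_ic_overlap"}
--         ],
--         "no_coverage_features": [feature for feature in features if feature not in {"case_coverage", "disease_coverage"}],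
--         "no_relation_features": [feature for feature in features if feature not in relation],
--     }
-- ===== SOURCE B (Python) =====
-- def feature_groups(features: list[str]) -> dict[str, list[str]]:
--     # Partition the indexed features once into five disjoint category buckets,
--     # then rebuild each group as the index-sorted merge of the four kept buckets.
--     hgnn, overlap, coverage, relation, other = [], [], [], [], []
--     for pair in enumerate(features):
--         f = pair[1]
--         if f == "hgnn_score":
--             hgnn.append(pair)
--         elif f in ("exact_overlap", "ic_weighted_overlap", "semantic_ic_overlap"):
--             overlap.append(pair)
--         elif f in ("case_coverage", "disease_coverage"):
--             coverage.append(pair)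
--         elif f.startswith("relation__"):
--             relation.append(pair)
--         else:
--             other.append(pair)
--
--     def regroup(*buckets):
--         merged = []
--         for b in buckets:
--             merged.extend(b)
--         merged.sort(key=lambda p: p[0])
--         return [f for _, f in merged]
--
--     return {
--         "all_features": features,
--         "no_hgnn_score": regroup(overlap, coverage, relation, other),
--         "no_overlap_features": regroup(hgnn, coverage, relation, other),
--         "no_coverage_features": regroup(hgnn, overlap, relation, other),
--         "no_relation_features": regroup(hgnn, overlap, coverage, other),
--     }
-- ===== Notes on version B (the rewrite author's own statement) =====
-- stated objective: alternative
-- what changed: Instead of filtering the feature list once per group, B partitions the indexed features into five disjoint category buckets in one pass and reconstructs each group by merging the four kept buckets back into index order; the quadratic 'not in relation' list scan disappears because a relation__-prefixed name is in the relation list exactly when it has the prefix.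
import Mathlib
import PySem

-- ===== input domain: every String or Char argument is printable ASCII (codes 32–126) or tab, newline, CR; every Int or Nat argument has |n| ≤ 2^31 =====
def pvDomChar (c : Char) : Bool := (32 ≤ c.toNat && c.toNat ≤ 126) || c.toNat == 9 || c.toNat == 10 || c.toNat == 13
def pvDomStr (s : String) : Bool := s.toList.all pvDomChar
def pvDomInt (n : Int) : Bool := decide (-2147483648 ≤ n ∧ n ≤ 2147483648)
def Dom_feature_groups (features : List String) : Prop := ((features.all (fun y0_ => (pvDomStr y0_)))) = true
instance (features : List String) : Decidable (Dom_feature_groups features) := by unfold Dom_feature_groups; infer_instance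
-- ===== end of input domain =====

-- B partitions the indexed features once into five disjoint category buckets and rebuilds each
-- group as the index-sorted merge of the four kept buckets, instead of A's per-group filter passes.

-- ===== PORT A =====
def feature_groups (features : List String) : List (String × List String) :=
  let relation := features.filter (fun f => PySem.Str.startswith f "relation__")
  [("all_features", features),
   ("no_hgnn_score", features.filter (fun f => f != "hgnn_score")),
   ("no_overlap_features", features.filter (fun f =>
      !(f == "exact_overlap" || f == "ic_weighted_overlap" || f == "semantic_ic_overlap"))),
   ("no_coverage_features", features.filter (fun f =>
      !(f == "case_coverage" || f == "disease_coverage"))),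
   ("no_relation_features", features.filter (fun f => !(relation.contains f)))]

-- ===== PORT B =====
-- B's branch tests
def isHgnn (f : String) : Bool := f == "hgnn_score"
def isOverlap (f : String) : Bool :=
  f == "exact_overlap" || f == "ic_weighted_overlap" || f == "semantic_ic_overlap"
def isCoverage (f : String) : Bool := f == "case_coverage" || f == "disease_coverage"
def isRelation (f : String) : Bool := PySem.Str.startswith f "relation__"

-- B's single loop over enumerate(features): five disjoint buckets of (index, feature)
def fgPartition : List (Int × String) →
    List (Int × String) × List (Int × String) × List (Int × String) × List (Int × String) × List (Int × String)
  | [] => ([], [], [], [], [])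
  | p :: rest =>
    let (h, o, c, r, t) := fgPartition rest
    if isHgnn p.2 then (p :: h, o, c, r, t)
    else if isOverlap p.2 then (h, p :: o, c, r, t)
    else if isCoverage p.2 then (h, o, p :: c, r, t)
    else if isRelation p.2 then (h, o, c, p :: r, t)
    else (h, o, c, r, p :: t)

-- B's regroup: concatenate the kept buckets, sort by index, drop the indices
def regroup (merged : List (Int × String)) : List String :=
  (PySem.List.sorted merged (fun p => p.1) false).map (fun p => p.2)

def feature_groups_alt (features : List String) : List (String × List String) :=
  let (h, o, c, r, t) := fgPartition (PySem.List.enumerate features 0)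
  [("all_features", features),
   ("no_hgnn_score", regroup (o ++ c ++ r ++ t)),
   ("no_overlap_features", regroup (h ++ c ++ r ++ t)),
   ("no_coverage_features", regroup (h ++ o ++ r ++ t)),
   ("no_relation_features", regroup (h ++ o ++ c ++ t))]

-- ===== PRECONDITION & SPEC =====
def Spec_feature_groups (features : List String) (out : List (String × List String)) : Prop := out = feature_groups_alt features
instance (features : List String) (out : List (String × List String)) : Decidable (Spec_feature_groups features out) := by unfold Spec_feature_groups; infer_instance

-- ===== CLAIM (what is proved, stated in full; the proofs are below) =====
def Claim_equal_feature_groups : Prop := ∀ (features : List String), Dom_feature_groups features → Spec_feature_groups features (feature_groups features)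

-- ===== LEMMAS AND PROOFS =====

-- the five chain conditions of B's elif ladder
def c1 (f : String) : Bool := isHgnn f
def c2 (f : String) : Bool := !isHgnn f && isOverlap f
def c3 (f : String) : Bool := !isHgnn f && !isOverlap f && isCoverage f
def c4 (f : String) : Bool := !isHgnn f && !isOverlap f && !isCoverage f && isRelation f
def c5 (f : String) : Bool := !isHgnn f && !isOverlap f && !isCoverage f && !isRelation f

theorem fgPartition_eq (l : List (Int × String)) :
    fgPartition l = (l.filter (fun p => c1 p.2), l.filter (fun p => c2 p.2),
                     l.filter (fun p => c3 p.2), l.filter (fun p => c4 p.2),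
                     l.filter (fun p => c5 p.2)) := by
  induction l with
  | nil => rfl
  | cons p rest ih =>
    simp only [fgPartition, ih, List.filter_cons, c1, c2, c3, c4, c5]
    by_cases h1 : isHgnn p.2 <;> by_cases h2 : isOverlap p.2 <;>
      by_cases h3 : isCoverage p.2 <;> by_cases h4 : isRelation p.2 <;>
      simp [h1, h2, h3, h4]

-- appending filters of disjoint predicates is a permutation of the filter of their union
theorem filter_append_perm {α : Type} (p q : α → Bool) (l : List α)
    (h : ∀ x, p x = true → q x = false) :
    (l.filter p ++ l.filter q).Perm (l.filter (fun x => p x || q x)) := by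
  induction l with
  | nil => simp
  | cons a l ih =>
    simp only [List.filter_cons]
    by_cases hp : p a = true
    · simp [hp, h a hp, List.Perm.cons _ ih]
    · by_cases hq : q a = true
      · simp only [Bool.not_eq_true] at hp
        simp only [hp, hq, Bool.false_or, if_neg (Bool.false_ne_true)]
        exact List.perm_middle.trans (List.Perm.cons a ih)
      · simp only [Bool.not_eq_true] at hp hq
        simp [hp, hq, ih]

-- drop the indices after filtering enumerate by a predicate on the feature
theorem map_snd_filter_enum (pred : String → Bool) (xs : List String) (s : Int) :
    (((PySem.List.enumerate xs s).filter (fun p => pred p.2)).map (fun p => p.2)) = xs.filter pred := by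
  induction xs generalizing s with
  | nil => simp [PySem.List.enumerate_nil]
  | cons x xs ih =>
    simp only [PySem.List.enumerate_cons, List.filter_cons]
    by_cases h : pred x <;> simp [h, ih]

-- the core regroup lemma: merging buckets that permute a filtered enumerate gives the plain filter
theorem regroup_eq (pred : String → Bool) (features : List String) (ms : List (Int × String))
    (hperm : ms.Perm ((PySem.List.enumerate features 0).filter (fun p => pred p.2))) :
    regroup ms = features.filter pred := by
  unfold regroup
  rw [PySem.List.sorted_eq_of_perm_of_pairwise_lt ms _ (fun p => p.1) hperm.symm
      ((PySem.List.pairwise_lt_enumerate features 0).filter _)]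
  exact map_snd_filter_enum pred features 0

-- four kept chain buckets permute the filter of the union predicate
theorem buckets_perm (e : String → Bool) (q1 q2 q3 q4 : String → Bool) (l : List (Int × String))
    (h12 : ∀ f, q1 f = true → q2 f = false)
    (h13 : ∀ f, q1 f = true → q3 f = false) (h23 : ∀ f, q2 f = true → q3 f = false)
    (h14 : ∀ f, q1 f = true → q4 f = false) (h24 : ∀ f, q2 f = true → q4 f = false)
    (h34 : ∀ f, q3 f = true → q4 f = false)
    (hu : ∀ f, (q1 f || (q2 f || (q3 f || q4 f))) = e f) :
    (l.filter (fun p => q1 p.2) ++ l.filter (fun p => q2 p.2) ++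
     l.filter (fun p => q3 p.2) ++ l.filter (fun p => q4 p.2)).Perm
      (l.filter (fun p => e p.2)) := by
  have p34 := filter_append_perm (fun p : Int × String => q3 p.2) (fun p => q4 p.2) l
      (fun p hp => h34 p.2 hp)
  have p234 : (l.filter (fun p => q2 p.2) ++ (l.filter (fun p => q3 p.2) ++ l.filter (fun p => q4 p.2))).Perm
      (l.filter (fun p => q2 p.2 || (q3 p.2 || q4 p.2))) :=
    ((List.Perm.refl _).append p34).trans
      (filter_append_perm (fun p : Int × String => q2 p.2) (fun p => q3 p.2 || q4 p.2) l
        (fun p hp => by simp [h23 p.2 hp, h24 p.2 hp]))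
  have p1234 : (l.filter (fun p => q1 p.2) ++ (l.filter (fun p => q2 p.2) ++
      (l.filter (fun p => q3 p.2) ++ l.filter (fun p => q4 p.2)))).Perm
      (l.filter (fun p => q1 p.2 || (q2 p.2 || (q3 p.2 || q4 p.2)))) :=
    ((List.Perm.refl _).append p234).trans
      (filter_append_perm (fun p : Int × String => q1 p.2)
        (fun p => q2 p.2 || (q3 p.2 || q4 p.2)) l
        (fun p hp => by simp [h12 p.2 hp, h13 p.2 hp, h14 p.2 hp]))
  have heq : (fun p : Int × String => q1 p.2 || (q2 p.2 || (q3 p.2 || q4 p.2))) =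
      (fun p : Int × String => e p.2) := by
    funext p; rw [← hu p.2]
  rw [heq] at p1234
  simpa using p1234

-- name disjointness of the elementary tests
theorem hg_ov : ∀ f, isHgnn f = true → isOverlap f = false := by
  intro f h; simp [isHgnn] at h; subst h; decide
theorem hg_cov : ∀ f, isHgnn f = true → isCoverage f = false := by
  intro f h; simp [isHgnn] at h; subst h; decide
theorem hg_rel : ∀ f, isHgnn f = true → isRelation f = false := by
  intro f h; simp [isHgnn] at h; subst h; decide
theorem ov_cov : ∀ f, isOverlap f = true → isCoverage f = false := by
  intro f h; simp [isOverlap] at h; rcases h with (h|h)|h <;> subst h <;> decide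
theorem ov_rel : ∀ f, isOverlap f = true → isRelation f = false := by
  intro f h; simp [isOverlap] at h; rcases h with (h|h)|h <;> subst h <;> decide
theorem cov_rel : ∀ f, isCoverage f = true → isRelation f = false := by
  intro f h; simp [isCoverage] at h; rcases h with h|h <;> subst h <;> decide

-- pairwise disjointness of the chain conditions
theorem d12 : ∀ f, c1 f = true → c2 f = false := by intro f h; simp [c1] at h; simp [c2, h]
theorem d13 : ∀ f, c1 f = true → c3 f = false := by intro f h; simp [c1] at h; simp [c3, h]
theorem d14 : ∀ f, c1 f = true → c4 f = false := by intro f h; simp [c1] at h; simp [c4, h]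
theorem d15 : ∀ f, c1 f = true → c5 f = false := by intro f h; simp [c1] at h; simp [c5, h]
theorem d23 : ∀ f, c2 f = true → c3 f = false := by
  intro f h; simp [c2] at h; simp [c3, h.2]
theorem d24 : ∀ f, c2 f = true → c4 f = false := by
  intro f h; simp [c2] at h; simp [c4, h.2]
theorem d25 : ∀ f, c2 f = true → c5 f = false := by
  intro f h; simp [c2] at h; simp [c5, h.2]
theorem d34 : ∀ f, c3 f = true → c4 f = false := by
  intro f h; simp [c3] at h; simp [c4, h.2]
theorem d35 : ∀ f, c3 f = true → c5 f = false := by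
  intro f h; simp [c3] at h; simp [c5, h.2]
theorem d45 : ∀ f, c4 f = true → c5 f = false := by
  intro f h; simp [c4] at h; simp [c5, h.2]

-- unions of the four kept chain conditions = A's group predicates
theorem hu_hgnn : ∀ f, (c2 f || (c3 f || (c4 f || c5 f))) = (f != "hgnn_score") := by
  intro f
  simp only [c2, c3, c4, c5, bne, isHgnn]
  cases h1 : f == "hgnn_score" <;> cases h2 : isOverlap f <;>
    cases h3 : isCoverage f <;> cases h4 : isRelation f <;> simp
theorem hu_overlap : ∀ f,
    (c1 f || (c3 f || (c4 f || c5 f))) =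
      (!(f == "exact_overlap" || f == "ic_weighted_overlap" || f == "semantic_ic_overlap")) := by
  intro f
  have : (!(f == "exact_overlap" || f == "ic_weighted_overlap" || f == "semantic_ic_overlap"))
      = !isOverlap f := by simp [isOverlap]
  rw [this]
  simp only [c1, c3, c4, c5]
  by_cases h1 : isHgnn f = true
  · simp [h1, hg_ov f h1]
  · simp only [Bool.not_eq_true] at h1
    cases h2 : isOverlap f <;> cases h3 : isCoverage f <;> cases h4 : isRelation f <;> simp [h1]
theorem hu_coverage : ∀ f,
    (c1 f || (c2 f || (c4 f || c5 f))) = (!(f == "case_coverage" || f == "disease_coverage")) := by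
  intro f
  have : (!(f == "case_coverage" || f == "disease_coverage")) = !isCoverage f := by
    simp [isCoverage]
  rw [this]
  simp only [c1, c2, c4, c5]
  by_cases h1 : isHgnn f = true
  · simp [h1, hg_cov f h1]
  · simp only [Bool.not_eq_true] at h1
    by_cases h2 : isOverlap f = true
    · simp [h1, h2, ov_cov f h2]
    · simp only [Bool.not_eq_true] at h2
      cases h3 : isCoverage f <;> cases h4 : isRelation f <;> simp [h1, h2]
theorem hu_relation : ∀ f,
    (c1 f || (c2 f || (c3 f || c5 f))) = (!(PySem.Str.startswith f "relation__")) := by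
  intro f
  have : (!(PySem.Str.startswith f "relation__")) = !isRelation f := by simp [isRelation]
  rw [this]
  simp only [c1, c2, c3, c5]
  by_cases h1 : isHgnn f = true
  · simp [h1, hg_rel f h1]
  · simp only [Bool.not_eq_true] at h1
    by_cases h2 : isOverlap f = true
    · simp [h1, h2, ov_rel f h2]
    · simp only [Bool.not_eq_true] at h2
      by_cases h3 : isCoverage f = true
      · simp [h1, h2, h3, cov_rel f h3]
      · simp only [Bool.not_eq_true] at h3
        cases h4 : isRelation f <;> simp [h1, h2, h3]

-- A's "not in relation" test equals the startswith test, on elements of features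
theorem relation_filter_eq (features : List String) :
    features.filter (fun f => !((features.filter (fun g => PySem.Str.startswith g "relation__")).contains f))
      = features.filter (fun f => !(PySem.Str.startswith f "relation__")) := by
  apply List.filter_congr
  intro f hf
  simp [List.mem_filter, hf]

-- ===== VERDICT (by name: the statement is the Claim_ definition above) =====
theorem feature_groups_spec : Claim_equal_feature_groups := by
  intro features _
  show feature_groups features = feature_groups_alt features
  simp only [feature_groups, feature_groups_alt, fgPartition_eq, relation_filter_eq]
  rw [regroup_eq _ features _ (buckets_perm _ c2 c3 c4 c5 _ d23 d24 d34 d25 d35 d45 hu_hgnn),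
      regroup_eq _ features _ (buckets_perm _ c1 c3 c4 c5 _ d13 d14 d34 d15 d35 d45 hu_overlap),
      regroup_eq _ features _ (buckets_perm _ c1 c2 c4 c5 _ d12 d14 d24 d15 d25 d45 hu_coverage),
      regroup_eq _ features _ (buckets_perm _ c1 c2 c3 c5 _ d12 d13 d23 d15 d25 d35 hu_relation)]
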